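-- pv_equiv track=rewrite | github.com/by-su/study | algorithm/python/P77485.py | solution
-- ===== SOURCE A (Python) =====
-- def solution(rows, columns, queries):
--     array = [[i * columns + j + 1 for j in range(columns)] for i in range(rows)]
--
--     answer = []
--     for query in queries:
--         r1 = query[0] - 1
--         c1 = query[1] - 1
--         r2 = query[2] - 1
--         c2 = query[3] - 1
--
--         first = array[r1][c1]
--         min_value = first
--
--         for r in range(r1, r2):
--             array[r][c1] = array[r + 1][c1]
--             min_value = min(array[r + 1][c1], min_value)
--
--         for c in range(c1, c2):
--             array[r2][c] = array[r2][c + 1]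
--             min_value = min(array[r2][c + 1], min_value)
--
--         for r in range(r2, r1, -1):
--             array[r][c2] = array[r - 1][c2]
--             min_value = min(array[r - 1][c2], min_value)
--
--         for c in range(c2, c1 + 1, -1):
--             array[r1][c] = array[r1][c - 1]
--             min_value = min(array[r1][c], min_value)
--
--         array[r1][c1 + 1] = first
--         answer.append(min_value)
--
--     return answer
-- ===== SOURCE B (Python) =====
-- def solution(rows, columns, queries):
--     array = [[i * columns + j + 1 for j in range(columns)] for i in range(rows)]
--
--     answer = []
--     for query in queries:
--         r1 = query[0] - 1
--         c1 = query[1] - 1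
--         r2 = query[2] - 1
--         c2 = query[3] - 1
--
--         # border ring, clockwise starting at the top-left corner
--         ring = [(r, c1) for r in range(r1, r2 + 1)]
--         ring += [(r2, c) for c in range(c1 + 1, c2 + 1)]
--         ring += [(r, c2) for r in range(r2 - 1, r1 - 1, -1)]
--         ring += [(r1, c) for c in range(c2 - 1, c1, -1)]
--
--         vals = [array[r][c] for r, c in ring]
--         answer.append(min(vals))
--
--         shifted = vals[1:] + vals[:1]
--         for (r, c), v in zip(ring, shifted):
--             array[r][c] = v
--
--     return answer
-- ===== Notes on version B (the rewrite author's own statement) =====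
-- stated objective: alternative
-- what changed: Replaces the four in-place shift loops (plus the separate corner patch-up and running min) with an explicit ring of border coordinates: all border values are read into one list, the answer is min of that list, and the rotation is one bulk write of the list shifted by one position.
-- outside the precondition, e.g. on solution(4, 4, [[-1, 1, 3, 2], [2, 1, 2, 1]]): A returns [1, 13], B returns [1, 9]; on solution(3, 3, [[2, 2, 3, 2], [0, -1, 0, 3]]): A returns [5, 7], B returns [5, 5]
import Mathlib
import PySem

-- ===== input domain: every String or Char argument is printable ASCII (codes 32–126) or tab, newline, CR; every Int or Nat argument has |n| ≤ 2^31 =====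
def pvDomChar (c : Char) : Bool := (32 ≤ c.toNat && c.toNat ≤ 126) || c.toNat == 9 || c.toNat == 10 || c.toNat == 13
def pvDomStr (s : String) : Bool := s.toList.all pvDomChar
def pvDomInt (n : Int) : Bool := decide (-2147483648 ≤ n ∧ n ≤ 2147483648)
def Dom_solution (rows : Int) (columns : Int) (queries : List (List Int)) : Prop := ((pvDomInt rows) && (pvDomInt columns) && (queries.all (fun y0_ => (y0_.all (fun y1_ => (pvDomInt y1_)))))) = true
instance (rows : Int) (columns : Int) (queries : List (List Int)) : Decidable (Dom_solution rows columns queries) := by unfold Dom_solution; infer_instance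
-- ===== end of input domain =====

-- B replaces A's four in-place shift loops (plus corner patch-up and running min) by one explicit
-- ring of border coordinates: read all border values, take their min, write them back shifted by one
-- (objective: alternative decomposition, same cost). Both Pythons mutate only their own local array,
-- so the equivalence is about the return value, which is the observable behaviour.

-- shared cell access helpers: array[r][c] and array[r][c] = v (both Pythons use the same grid)
def getCell (g : List (List Int)) (r c : Int) : Int :=
  PySem.List.pyGetD (PySem.List.pyGetD g r []) c 0

def setCell (g : List (List Int)) (r c : Int) (v : Int) : List (List Int) :=
  PySem.List.pySetD g r (PySem.List.pySetD (PySem.List.pyGetD g r []) c v)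

-- [[i * columns + j + 1 for j in range(columns)] for i in range(rows)]  (identical first line of A and B)
def mkGrid (rows columns : Int) : List (List Int) :=
  (PySem.List.pyRange 0 rows 1).map (fun i =>
    (PySem.List.pyRange 0 columns 1).map (fun j => i * columns + j + 1))

-- ===== PORT A =====
-- body of A's `for query in queries` loop: four border-shift loops with a running min
def solutionStep (st : List (List Int) × List Int) (query : List Int) : List (List Int) × List Int :=
  let r1 := PySem.List.pyGetD query 0 0 - 1
  let c1 := PySem.List.pyGetD query 1 0 - 1
  let r2 := PySem.List.pyGetD query 2 0 - 1
  let c2 := PySem.List.pyGetD query 3 0 - 1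
  let first := getCell st.1 r1 c1
  let p1 := (PySem.List.pyRange r1 r2 1).foldl
    (fun (p : List (List Int) × Int) r =>
      let v := getCell p.1 (r + 1) c1
      (setCell p.1 r c1 v, min v p.2)) (st.1, first)
  let p2 := (PySem.List.pyRange c1 c2 1).foldl
    (fun (p : List (List Int) × Int) c =>
      let v := getCell p.1 r2 (c + 1)
      (setCell p.1 r2 c v, min v p.2)) p1
  let p3 := (PySem.List.pyRange r2 r1 (-1)).foldl
    (fun (p : List (List Int) × Int) r =>
      let v := getCell p.1 (r - 1) c2
      (setCell p.1 r c2 v, min v p.2)) p2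
  let p4 := (PySem.List.pyRange c2 (c1 + 1) (-1)).foldl
    (fun (p : List (List Int) × Int) c =>
      let g' := setCell p.1 r1 c (getCell p.1 r1 (c - 1))
      (g', min (getCell g' r1 c) p.2)) p3
  (setCell p4.1 r1 (c1 + 1) first, st.2 ++ [p4.2])

def solution (rows : Int) (columns : Int) (queries : List (List Int)) : List Int :=
  (queries.foldl solutionStep (mkGrid rows columns, [])).2

-- ===== PORT B =====
-- body of B's `for query in queries` loop: ring of border coordinates, bulk read, min, shifted bulk write
def solutionAltStep (st : List (List Int) × List Int) (query : List Int) : List (List Int) × List Int :=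
  let r1 := PySem.List.pyGetD query 0 0 - 1
  let c1 := PySem.List.pyGetD query 1 0 - 1
  let r2 := PySem.List.pyGetD query 2 0 - 1
  let c2 := PySem.List.pyGetD query 3 0 - 1
  let ring :=
    (PySem.List.pyRange r1 (r2 + 1) 1).map (fun r => (r, c1))
    ++ (PySem.List.pyRange (c1 + 1) (c2 + 1) 1).map (fun c => (r2, c))
    ++ (PySem.List.pyRange (r2 - 1) (r1 - 1) (-1)).map (fun r => (r, c2))
    ++ (PySem.List.pyRange (c2 - 1) c1 (-1)).map (fun c => (r1, c))
  let vals := ring.map (fun rc => getCell st.1 rc.1 rc.2)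
  let m := (PySem.List.min? vals (fun x => x)).getD 0
  let shifted := PySem.List.slice vals (some 1) none ++ PySem.List.slice vals none (some 1)
  let g' := (ring.zip shifted).foldl (fun h pv => setCell h pv.1.1 pv.1.2 pv.2) st.1
  (g', st.2 ++ [m])

def solution_alt (rows : Int) (columns : Int) (queries : List (List Int)) : List Int :=
  (queries.foldl solutionAltStep (mkGrid rows columns, [])).2

-- ===== PRECONDITION & SPEC =====
-- Pre_ restricts the queries to the problem's natural domain: each query is a genuine 1-based
-- sub-rectangle [r1,r2]×[c1,c2] with r1 < r2, c1 < c2 lying inside the grid.  Outside it A either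
-- raises (IndexError on short queries or out-of-range corners) or returns accidental values of its
-- in-place shifting (Python negative-index wraparound, degenerate one-row/one-column rectangles).
def Pre_solution (rows : Int) (columns : Int) (queries : List (List Int)) : Prop :=
  ∀ q ∈ queries,
    4 ≤ q.length ∧
    1 ≤ q.getD 0 0 ∧ q.getD 0 0 < q.getD 2 0 ∧ q.getD 2 0 ≤ rows ∧
    1 ≤ q.getD 1 0 ∧ q.getD 1 0 < q.getD 3 0 ∧ q.getD 3 0 ≤ columns

instance (rows : Int) (columns : Int) (queries : List (List Int)) : Decidable (Pre_solution rows columns queries) := by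
  unfold Pre_solution; infer_instance

def pvWitness_solution : Int × Int × List (List Int) := (3, 3, [[1, 1, 2, 2], [2, 2, 3, 3]])

def Spec_solution (rows : Int) (columns : Int) (queries : List (List Int)) (out : List Int) : Prop :=
  out = solution_alt rows columns queries

instance (rows : Int) (columns : Int) (queries : List (List Int)) (out : List Int) : Decidable (Spec_solution rows columns queries out) := by
  unfold Spec_solution; infer_instance

-- ===== CLAIM (what is proved, stated in full; the proofs are below) =====
def Claim_equal_solution : Prop := ∀ (rows : Int) (columns : Int) (queries : List (List Int)), Dom_solution rows columns queries → Pre_solution rows columns queries → Spec_solution rows columns queries (solution rows columns queries)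

-- ===== LEMMAS AND PROOFS =====

-- `array[r][c] = v` then `array[r'][c']` / row lengths, with nonnegative indices
theorem getCell_eq (g : List (List Int)) {r c : Int} (hr : 0 ≤ r) (hc : 0 ≤ c) :
    getCell g r c = (g.getD r.toNat []).getD c.toNat 0 := by
  have h1 : r = ((r.toNat : Nat) : Int) := by omega
  have h2 : c = ((c.toNat : Nat) : Int) := by omega
  rw [getCell, h1, h2, PySem.List.pyGetD_natCast, PySem.List.pyGetD_natCast]
  simp only [Int.toNat_natCast]

theorem setCell_eq (g : List (List Int)) {r c : Int} (hr : 0 ≤ r) (hc : 0 ≤ c) (v : Int) :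
    setCell g r c v = g.set r.toNat ((g.getD r.toNat []).set c.toNat v) := by
  have h1 : r = ((r.toNat : Nat) : Int) := by omega
  rw [setCell, h1, PySem.List.pyGetD_natCast, PySem.List.pySetD_of_nonneg _ _ hc,
    PySem.List.pySetD_of_nonneg _ _ (by omega)]
  simp only [Int.toNat_natCast]

theorem setCell_length (g : List (List Int)) (r c : Int) (v : Int) :
    (setCell g r c v).length = g.length := by
  rw [setCell, PySem.List.length_pySetD]

theorem getCell_setCell_ne (g : List (List Int)) {r c r' c' : Int} (v : Int)
    (hr : 0 ≤ r) (hc : 0 ≤ c) (hr' : 0 ≤ r') (hc' : 0 ≤ c')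
    (hne : (r, c) ≠ (r', c')) :
    getCell (setCell g r c v) r' c' = getCell g r' c' := by
  rw [getCell_eq _ hr' hc', getCell_eq g hr' hc', setCell_eq _ hr hc]
  by_cases hrr : r.toNat = r'.toNat
  · have hrr' : r = r' := by omega
    have hcc : c.toNat ≠ c'.toNat := by
      intro h
      exact hne (by rw [hrr', Prod.mk.injEq]; exact ⟨rfl, by omega⟩)
    rw [← hrr]
    by_cases hlen : r.toNat < g.length
    · simp only [List.getD_eq_getElem?_getD, List.getElem?_set_self hlen, Option.getD_some]
      rw [List.getElem?_set_ne hcc]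
    · rw [List.set_eq_of_length_le (by omega)]
  · simp only [List.getD_eq_getElem?_getD]
    rw [List.getElem?_set_ne hrr]

theorem getCell_setCell_self (g : List (List Int)) {r c : Int} (v : Int)
    (hr : 0 ≤ r) (hc : 0 ≤ c)
    (hrl : r < (g.length : Int))
    (hcl : c < (((PySem.List.pyGetD g r []).length : Nat) : Int)) :
    getCell (setCell g r c v) r c = v := by
  have hrow : PySem.List.pyGetD g r [] = g.getD r.toNat [] := by
    have h1 : r = ((r.toNat : Nat) : Int) := by omega
    rw [h1, PySem.List.pyGetD_natCast]
    simp only [Int.toNat_natCast]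
  rw [getCell_eq _ hr hc, setCell_eq _ hr hc]
  rw [hrow] at hcl
  have hrl' : r.toNat < g.length := by omega
  have hcl' : c.toNat < (g.getD r.toNat []).length := by omega
  simp only [List.getD_eq_getElem?_getD, List.getElem?_set_self hrl', Option.getD_some]
  rw [List.getElem?_set_self (by simpa [List.getD_eq_getElem?_getD] using hcl')]
  rfl

theorem rowLen_setCell (g : List (List Int)) {r c r' : Int} (v : Int)
    (hr : 0 ≤ r) (hc : 0 ≤ c) (hr' : 0 ≤ r') :
    (PySem.List.pyGetD (setCell g r c v) r' []).length = (PySem.List.pyGetD g r' []).length := by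
  have h1 : r' = ((r'.toNat : Nat) : Int) := by omega
  rw [h1, PySem.List.pyGetD_natCast, PySem.List.pyGetD_natCast, setCell_eq _ hr hc]
  simp only [List.getD_eq_getElem?_getD]
  by_cases hrr : r.toNat = r'.toNat
  · rw [← hrr]
    by_cases hlen : r.toNat < g.length
    · simp only [List.getElem?_set_self hlen, Option.getD_some, List.length_set]
    · rw [List.set_eq_of_length_le (by omega)]
  · rw [List.getElem?_set_ne hrr]

-- grid shape: row count and every row's length (both preserved by writes)
def ShapeG (g : List (List Int)) (rows columns : Int) : Prop :=
  (g.length : Int) = rows ∧ ∀ row ∈ g, ((row.length : Nat) : Int) = columns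

theorem shape_setCell {g : List (List Int)} {rows columns : Int} {r c : Int} (v : Int)
    (hr : 0 ≤ r) (hc : 0 ≤ c) (hs : ShapeG g rows columns) : ShapeG (setCell g r c v) rows columns := by
  obtain ⟨hlen, hrows⟩ := hs
  constructor
  · rw [setCell_length]; exact hlen
  · intro row hrow
    rw [setCell_eq _ hr hc] at hrow
    by_cases hlt : r.toNat < g.length
    · rcases List.mem_or_eq_of_mem_set hrow with h | h
      · exact hrows _ h
      · subst h
        rw [List.length_set]
        exact hrows _ (by rw [List.getD_eq_getElem?_getD, List.getElem?_eq_getElem hlt]; exact List.getElem_mem hlt)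
    · rw [List.set_eq_of_length_le (by omega)] at hrow
      exact hrows _ hrow

-- a batch of writes, in order
def writeList (ps : List ((Int × Int) × Int)) (g : List (List Int)) : List (List Int) :=
  ps.foldl (fun h pv => setCell h pv.1.1 pv.1.2 pv.2) g

theorem writeList_cons (p : (Int × Int) × Int) (ps : List ((Int × Int) × Int)) (g : List (List Int)) :
    writeList (p :: ps) g = writeList ps (setCell g p.1.1 p.1.2 p.2) := rfl

theorem writeList_append (ps qs : List ((Int × Int) × Int)) (g : List (List Int)) :
    writeList (ps ++ qs) g = writeList qs (writeList ps g) := by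
  simp [writeList, List.foldl_append]

theorem length_writeList (ps : List ((Int × Int) × Int)) (g : List (List Int)) :
    (writeList ps g).length = g.length := by
  induction ps generalizing g with
  | nil => rfl
  | cons p ps ih => rw [writeList_cons, ih, setCell_length]

theorem rowLen_writeList (ps : List ((Int × Int) × Int)) {r' : Int} (hr' : 0 ≤ r') :
    ∀ (g : List (List Int)), (∀ p ∈ ps, 0 ≤ p.1.1 ∧ 0 ≤ p.1.2) →
    (PySem.List.pyGetD (writeList ps g) r' []).length = (PySem.List.pyGetD g r' []).length := by
  induction ps with
  | nil => intro g _; rfl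
  | cons p ps ih =>
    intro g hnn
    rw [writeList_cons, ih _ (fun q hq => hnn q (by simp [hq])),
      rowLen_setCell _ _ (hnn p (by simp)).1 (hnn p (by simp)).2 hr']

theorem shape_writeList (ps : List ((Int × Int) × Int)) {rows columns : Int} :
    ∀ (g : List (List Int)), (∀ p ∈ ps, 0 ≤ p.1.1 ∧ 0 ≤ p.1.2) → ShapeG g rows columns →
    ShapeG (writeList ps g) rows columns := by
  induction ps with
  | nil => intro g _ hs; exact hs
  | cons p ps ih =>
    intro g hnn hs
    rw [writeList_cons]
    exact ih _ (fun q hq => hnn q (by simp [hq])) (shape_setCell _ (hnn p (by simp)).1 (hnn p (by simp)).2 hs)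

theorem getCell_writeList_ne (ps : List ((Int × Int) × Int)) {r c : Int}
    (hr : 0 ≤ r) (hc : 0 ≤ c) :
    ∀ (g : List (List Int)), (∀ p ∈ ps, 0 ≤ p.1.1 ∧ 0 ≤ p.1.2 ∧ p.1 ≠ (r, c)) →
    getCell (writeList ps g) r c = getCell g r c := by
  induction ps with
  | nil => intro g _; rfl
  | cons p ps ih =>
    intro g h
    obtain ⟨h1, h2, h3⟩ := h p (by simp)
    rw [writeList_cons, ih _ (fun q hq => h q (by simp [hq])),
      getCell_setCell_ne _ _ h1 h2 hr hc h3]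

-- A's loops 1–3: each iteration reads a cell no earlier iteration of the same loop wrote, so the
-- whole loop is a batch write of values taken from the starting grid, with the min folded over them
theorem loop_char (pos src : Int → Int × Int) (idxs : List Int) :
    ∀ (g : List (List Int)) (m : Int),
    (∀ x ∈ idxs, 0 ≤ (pos x).1 ∧ 0 ≤ (pos x).2 ∧ 0 ≤ (src x).1 ∧ 0 ≤ (src x).2) →
    idxs.Pairwise (fun a b => pos a ≠ src b) →
    idxs.foldl (fun (p : List (List Int) × Int) x =>
        (setCell p.1 (pos x).1 (pos x).2 (getCell p.1 (src x).1 (src x).2),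
         min (getCell p.1 (src x).1 (src x).2) p.2)) (g, m)
    = (writeList (idxs.map (fun x => (pos x, getCell g (src x).1 (src x).2))) g,
       (idxs.map (fun x => getCell g (src x).1 (src x).2)).foldl (fun acc v => min v acc) m) := by
  induction idxs with
  | nil => intro g m _ _; rfl
  | cons x xs ih =>
    intro g m hnn hpw
    obtain ⟨hpx, hpw'⟩ := List.pairwise_cons.mp hpw
    obtain ⟨h1, h2, h3, h4⟩ := hnn x (by simp)
    simp only [List.foldl_cons]
    refine (ih _ _ (fun y hy => hnn y (by simp [hy])) hpw').trans ?_
    have hget : ∀ y ∈ xs,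
        getCell (setCell g (pos x).1 (pos x).2 (getCell g (src x).1 (src x).2)) (src y).1 (src y).2
          = getCell g (src y).1 (src y).2 := by
      intro y hy
      obtain ⟨_, _, h3', h4'⟩ := hnn y (by simp [hy])
      exact getCell_setCell_ne _ _ h1 h2 h3' h4' (hpx y hy)
    have hm1 : xs.map (fun y => (pos y,
        getCell (setCell g (pos x).1 (pos x).2 (getCell g (src x).1 (src x).2)) (src y).1 (src y).2))
        = xs.map (fun y => (pos y, getCell g (src y).1 (src y).2)) :=
      List.map_congr_left (fun y hy => by rw [hget y hy])
    have hm2 : xs.map (fun y =>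
        getCell (setCell g (pos x).1 (pos x).2 (getCell g (src x).1 (src x).2)) (src y).1 (src y).2)
        = xs.map (fun y => getCell g (src y).1 (src y).2) :=
      List.map_congr_left hget
    rw [hm1, hm2]
    simp only [List.map_cons, writeList_cons, List.foldl_cons]

-- A's loop 4 re-reads the cell just written; with the write in range that read returns the written
-- value, so the loop has the same batch-write characterisation
theorem loop4_char (pos src : Int → Int × Int) (idxs : List Int) :
    ∀ (g : List (List Int)) (m : Int),
    (∀ x ∈ idxs, 0 ≤ (pos x).1 ∧ 0 ≤ (pos x).2 ∧ 0 ≤ (src x).1 ∧ 0 ≤ (src x).2) →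
    idxs.Pairwise (fun a b => pos a ≠ src b) →
    (∀ x ∈ idxs, (pos x).1 < (g.length : Int) ∧
      (pos x).2 < (((PySem.List.pyGetD g (pos x).1 []).length : Nat) : Int)) →
    idxs.foldl (fun (p : List (List Int) × Int) x =>
        (setCell p.1 (pos x).1 (pos x).2 (getCell p.1 (src x).1 (src x).2),
         min (getCell (setCell p.1 (pos x).1 (pos x).2 (getCell p.1 (src x).1 (src x).2))
              (pos x).1 (pos x).2) p.2)) (g, m)
    = (writeList (idxs.map (fun x => (pos x, getCell g (src x).1 (src x).2))) g,
       (idxs.map (fun x => getCell g (src x).1 (src x).2)).foldl (fun acc v => min v acc) m) := by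
  induction idxs with
  | nil => intro g m _ _ _; rfl
  | cons x xs ih =>
    intro g m hnn hpw hrg
    obtain ⟨hpx, hpw'⟩ := List.pairwise_cons.mp hpw
    obtain ⟨h1, h2, h3, h4⟩ := hnn x (by simp)
    obtain ⟨h5, h6⟩ := hrg x (by simp)
    simp only [List.foldl_cons]
    rw [getCell_setCell_self _ _ h1 h2 h5 h6]
    have hrg' : ∀ y ∈ xs, (pos y).1 <
        (((setCell g (pos x).1 (pos x).2 (getCell g (src x).1 (src x).2)).length : Nat) : Int) ∧
        (pos y).2 < (((PySem.List.pyGetD (setCell g (pos x).1 (pos x).2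
          (getCell g (src x).1 (src x).2)) (pos y).1 []).length : Nat) : Int) := by
      intro y hy
      obtain ⟨hA, hB⟩ := hrg y (by simp [hy])
      obtain ⟨hC, _, _, _⟩ := hnn y (by simp [hy])
      refine ⟨by rw [setCell_length]; exact hA, ?_⟩
      rw [rowLen_setCell _ _ h1 h2 hC]
      exact hB
    refine (ih _ _ (fun y hy => hnn y (by simp [hy])) hpw' hrg').trans ?_
    have hget : ∀ y ∈ xs,
        getCell (setCell g (pos x).1 (pos x).2 (getCell g (src x).1 (src x).2)) (src y).1 (src y).2
          = getCell g (src y).1 (src y).2 := by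
      intro y hy
      obtain ⟨_, _, h3', h4'⟩ := hnn y (by simp [hy])
      exact getCell_setCell_ne _ _ h1 h2 h3' h4' (hpx y hy)
    have hm1 : xs.map (fun y => (pos y,
        getCell (setCell g (pos x).1 (pos x).2 (getCell g (src x).1 (src x).2)) (src y).1 (src y).2))
        = xs.map (fun y => (pos y, getCell g (src y).1 (src y).2)) :=
      List.map_congr_left (fun y hy => by rw [hget y hy])
    have hm2 : xs.map (fun y =>
        getCell (setCell g (pos x).1 (pos x).2 (getCell g (src x).1 (src x).2)) (src y).1 (src y).2)
        = xs.map (fun y => getCell g (src y).1 (src y).2) :=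
      List.map_congr_left hget
    rw [hm1, hm2]
    simp only [List.map_cons, writeList_cons, List.foldl_cons]

-- B's `zip(ring, vals[1:] + vals[:1])` is the list of (position, value-of-ring-successor) pairs
def adjW (f : Int × Int → Int) : List (Int × Int) → Int → List ((Int × Int) × Int)
  | [], _ => []
  | [p], b => [(p, b)]
  | p :: q :: t, b => (p, f q) :: adjW f (q :: t) b

theorem zip_tail_adjW (f : Int × Int → Int) :
    ∀ (l : List (Int × Int)) (p0 : Int × Int) (b : Int),
    (p0 :: l).zip (l.map f ++ [b]) = adjW f (p0 :: l) b := by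
  intro l
  induction l with
  | nil => intro p0 b; rfl
  | cons q t ih => intro p0 b; simpa [adjW] using ih q b

theorem adjW_append (f : Int × Int → Int) :
    ∀ (s : List (Int × Int)) (q : Int × Int) (t : List (Int × Int)) (b : Int),
    adjW f (s ++ q :: t) b = adjW f s (f q) ++ adjW f (q :: t) b := by
  intro s
  induction s with
  | nil => intro q t b; rfl
  | cons p s' ih =>
    intro q t b
    cases s' with
    | nil => rfl
    | cons p' s'' => simpa [adjW] using ih q t b

theorem adjW_map_range (f : Int × Int → Int) :
    ∀ (N : Nat) (pos : Nat → Int × Int) (b : Int),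
    adjW f ((List.range (N + 1)).map pos) b
      = (List.range N).map (fun k => (pos k, f (pos (k + 1)))) ++ [(pos N, b)] := by
  intro N
  induction N with
  | zero =>
    intro pos b
    simp [List.range_succ, adjW]
  | succ N ih =>
    intro pos b
    have e1 : (List.range (N + 1 + 1)).map pos
        = pos 0 :: (List.range (N + 1)).map (fun (k : Nat) => pos (k + 1)) := by
      rw [List.range_succ_eq_map, List.map_cons, List.map_map]
      rfl
    have e2 : (List.range (N + 1)).map (fun (k : Nat) => pos (k + 1))
        = pos 1 :: (List.range N).map (fun k => pos (k + 2)) := by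
      rw [List.range_succ_eq_map, List.map_cons, List.map_map]
      rfl
    rw [e1, e2, adjW, ← e2, ih (fun k => pos (k + 1)) b]
    rw [show (List.range (N + 1)).map (fun (k : Nat) => (pos k, f (pos (k + 1))))
        = (pos 0, f (pos 1)) :: (List.range N).map (fun k => (pos (k + 1), f (pos (k + 2)))) by
      rw [List.range_succ_eq_map, List.map_cons, List.map_map]; rfl]
    simp

-- the ring of border coordinates, as built by B
def ringL (r1 c1 r2 c2 : Int) : List (Int × Int) :=
  (PySem.List.pyRange r1 (r2 + 1) 1).map (fun r => (r, c1))
  ++ (PySem.List.pyRange (c1 + 1) (c2 + 1) 1).map (fun c => (r2, c))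
  ++ (PySem.List.pyRange (r2 - 1) (r1 - 1) (-1)).map (fun r => (r, c2))
  ++ (PySem.List.pyRange (c2 - 1) c1 (-1)).map (fun c => (r1, c))

def ringT (r1 c1 r2 c2 : Int) : List (Int × Int) :=
  (PySem.List.pyRange (r1 + 1) (r2 + 1) 1).map (fun r => (r, c1))
  ++ (PySem.List.pyRange (c1 + 1) (c2 + 1) 1).map (fun c => (r2, c))
  ++ (PySem.List.pyRange (r2 - 1) (r1 - 1) (-1)).map (fun r => (r, c2))
  ++ (PySem.List.pyRange (c2 - 1) c1 (-1)).map (fun c => (r1, c))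

theorem ring_cons (r1 c1 r2 c2 : Int) (h : r1 < r2 + 1) :
    ringL r1 c1 r2 c2 = (r1, c1) :: ringT r1 c1 r2 c2 := by
  rw [ringL, ringT, PySem.List.pyRange_one_cons h]
  rfl

-- common normal form of both sides' write lists (rectangle r1..r1+N+1 × c1..c1+M+1)
def NF (read : Int × Int → Int) (r1 c1 : Int) (N M : Nat) : List ((Int × Int) × Int) :=
  (List.range (N + 1)).map (fun (k : Nat) => ((r1 + (k : Int), c1), read (r1 + (k : Int) + 1, c1)))
  ++ (List.range (M + 1)).map (fun (k : Nat) =>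
      ((r1 + (N : Int) + 1, c1 + (k : Int)), read (r1 + (N : Int) + 1, c1 + (k : Int) + 1)))
  ++ (List.range (N + 1)).map (fun (k : Nat) =>
      ((r1 + (N : Int) + 1 - (k : Int), c1 + (M : Int) + 1), read (r1 + (N : Int) - (k : Int), c1 + (M : Int) + 1)))
  ++ (List.range (M + 1)).map (fun (k : Nat) =>
      ((r1, c1 + (M : Int) + 1 - (k : Int)), read (r1, c1 + (M : Int) - (k : Int))))

-- rewrite a mapped ascending / descending pyRange as a mapped List.range
theorem pyRange_map_one {α : Type} (f : Int → α) (a b : Int) (n : Nat) (h : b = a + (n : Int)) :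
    (PySem.List.pyRange a b 1).map f = (List.range n).map (fun (k : Nat) => f (a + (k : Int))) := by
  subst h
  rw [PySem.List.pyRange_one, List.map_map, show ((a + (n : Int) - a).toNat = n) from by omega]
  rfl

theorem pyRange_map_negone {α : Type} (f : Int → α) (a b : Int) (n : Nat) (h : a = b + (n : Int)) :
    (PySem.List.pyRange a b (-1)).map f = (List.range n).map (fun (k : Nat) => f (a - (k : Int))) := by
  subst h
  rw [PySem.List.pyRange_neg_one, List.map_map, show ((b + (n : Int) - b).toNat = n) from by omega]
  rfl

theorem pairF_eq (read : Int × Int → Int) {a b a' b' x y x' y' : Int}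
    (h1 : a = a') (h2 : b = b') (h3 : x = x') (h4 : y = y') :
    ((a, b), read (x, y)) = ((a', b'), read (x', y')) := by
  subst h1; subst h2; subst h3; subst h4; rfl

-- A's write list (four loops, in order, plus the final corner write) in normal form
theorem A_nf (read : Int × Int → Int) (r1 c1 : Int) (N M : Nat) :
    (PySem.List.pyRange r1 (r1 + (N : Int) + 1) 1).map (fun r => ((r, c1), read (r + 1, c1)))
    ++ (PySem.List.pyRange c1 (c1 + (M : Int) + 1) 1).map (fun c =>
        ((r1 + (N : Int) + 1, c), read (r1 + (N : Int) + 1, c + 1)))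
    ++ (PySem.List.pyRange (r1 + (N : Int) + 1) r1 (-1)).map (fun r =>
        ((r, c1 + (M : Int) + 1), read (r - 1, c1 + (M : Int) + 1)))
    ++ (PySem.List.pyRange (c1 + (M : Int) + 1) (c1 + 1) (-1)).map (fun c =>
        ((r1, c), read (r1, c - 1)))
    ++ [((r1, c1 + 1), read (r1, c1))]
    = NF read r1 c1 N M := by
  rw [pyRange_map_one _ r1 _ (N + 1) (by omega),
      pyRange_map_one _ c1 _ (M + 1) (by omega),
      pyRange_map_negone _ _ r1 (N + 1) (by omega),
      pyRange_map_negone _ _ (c1 + 1) M (by omega), NF]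
  rw [show (List.range (M + 1)).map (fun (k : Nat) =>
        ((r1, c1 + (M : Int) + 1 - (k : Int)), read (r1, c1 + (M : Int) - (k : Int))))
      = (List.range M).map (fun (k : Nat) =>
        ((r1, c1 + (M : Int) + 1 - (k : Int)), read (r1, c1 + (M : Int) - (k : Int))))
        ++ [((r1, c1 + (M : Int) + 1 - (M : Int)), read (r1, c1 + (M : Int) - (M : Int)))] from by
      rw [List.range_succ, List.map_append, List.map_singleton]]
  simp only [List.append_assoc]
  refine congrArg₂ (· ++ ·) ?_ (congrArg₂ (· ++ ·) ?_ (congrArg₂ (· ++ ·) ?_ (congrArg₂ (· ++ ·) ?_ ?_)))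
  · exact List.map_congr_left (fun k _ => pairF_eq read (by omega) (by omega) (by omega) (by omega))
  · exact List.map_congr_left (fun k _ => pairF_eq read (by omega) (by omega) (by omega) (by omega))
  · exact List.map_congr_left (fun k _ => pairF_eq read (by omega) (by omega) (by omega) (by omega))
  · exact List.map_congr_left (fun k _ => pairF_eq read (by omega) (by omega) (by omega) (by omega))
  · exact congrArg (fun p => [p]) (pairF_eq read (by omega) (by omega) (by omega) (by omega))

theorem range_map_cons {α : Type} (X : Nat) (p : Nat → α) :
    (List.range (X + 1)).map p = p 0 :: (List.range X).map (fun k => p (k + 1)) := by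
  rw [List.range_succ_eq_map, List.map_cons, List.map_map]
  rfl

theorem adjW_seg_cons (f : Int × Int → Int) (p : Nat → Int × Int) (X : Nat)
    (r0 : Int × Int) (rest : List (Int × Int)) (b : Int) :
    adjW f ((List.range (X + 1)).map p ++ (r0 :: rest)) b
    = ((List.range X).map (fun k => (p k, f (p (k + 1)))) ++ [(p X, f r0)])
      ++ adjW f (r0 :: rest) b := by
  rw [adjW_append f _ r0 rest b, adjW_map_range f X p (f r0)]

theorem adjW_seg_gen (f : Int × Int → Int) (p q : Nat → Int × Int) (X Y : Nat) (b : Int)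
    (hb : Y = 0 → f (q 0) = b) :
    adjW f ((List.range (X + 1)).map p ++ (List.range Y).map q) b
    = ((List.range X).map (fun k => (p k, f (p (k + 1)))) ++ [(p X, f (q 0))])
      ++ adjW f ((List.range Y).map q) b := by
  cases Y with
  | zero =>
    simp only [List.range_zero, List.map_nil, List.append_nil]
    rw [adjW_map_range f X p b, hb rfl]
    simp [adjW]
  | succ Y' =>
    rw [range_map_cons Y' q, adjW_seg_cons]

-- peeling the ring's four segments off one by one under adjW
theorem adjW_four (f : Int × Int → Int) (p1 p2 p3 p4 : Nat → Int × Int)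
    (X1 X2 X3 X4 : Nat) (b : Int) (hb : X4 = 0 → f (p4 0) = b) :
    adjW f ((List.range (X1 + 1)).map p1 ++ ((List.range (X2 + 1)).map p2
      ++ ((List.range (X3 + 1)).map p3 ++ (List.range X4).map p4))) b
    = (List.range X1).map (fun k => (p1 k, f (p1 (k + 1)))) ++ ((p1 X1, f (p2 0)) ::
      ((List.range X2).map (fun k => (p2 k, f (p2 (k + 1)))) ++ ((p2 X2, f (p3 0)) ::
      ((List.range X3).map (fun k => (p3 k, f (p3 (k + 1)))) ++ ((p3 X3, f (p4 0)) ::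
      adjW f ((List.range X4).map p4) b))))) := by
  rw [show (List.range (X2 + 1)).map p2 ++ ((List.range (X3 + 1)).map p3 ++ (List.range X4).map p4)
      = p2 0 :: ((List.range X2).map (fun k => p2 (k + 1))
        ++ ((List.range (X3 + 1)).map p3 ++ (List.range X4).map p4)) from by
    rw [range_map_cons X2 p2, List.cons_append]]
  rw [adjW_seg_cons f p1 X1 _ _ b]
  rw [show (p2 0 : Int × Int) :: ((List.range X2).map (fun k => p2 (k + 1))
        ++ ((List.range (X3 + 1)).map p3 ++ (List.range X4).map p4))
      = (List.range (X2 + 1)).map p2 ++ ((List.range (X3 + 1)).map p3 ++ (List.range X4).map p4) from by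
    rw [range_map_cons X2 p2, List.cons_append]]
  rw [show (List.range (X3 + 1)).map p3 ++ (List.range X4).map p4
      = p3 0 :: ((List.range X3).map (fun k => p3 (k + 1)) ++ (List.range X4).map p4) from by
    rw [range_map_cons X3 p3, List.cons_append]]
  rw [adjW_seg_cons f p2 X2 _ _ b]
  rw [show (p3 0 : Int × Int) :: ((List.range X3).map (fun k => p3 (k + 1)) ++ (List.range X4).map p4)
      = (List.range (X3 + 1)).map p3 ++ (List.range X4).map p4 from by
    rw [range_map_cons X3 p3, List.cons_append]]
  rw [adjW_seg_gen f p3 p4 X3 X4 b hb]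
  simp only [List.append_assoc, List.cons_append, List.nil_append]

-- B's write list (ring zipped with the one-step-shifted values) in the same normal form
theorem B_nf (read : Int × Int → Int) (r1 c1 : Int) (N M : Nat) :
    adjW read (ringL r1 c1 (r1 + (N : Int) + 1) (c1 + (M : Int) + 1)) (read (r1, c1))
    = NF read r1 c1 N M := by
  rw [ringL,
    pyRange_map_one (fun r => (r, c1)) r1 _ (N + 2) (by omega),
    pyRange_map_one (fun c => (r1 + (N : Int) + 1, c)) (c1 + 1) _ (M + 1) (by omega),
    pyRange_map_negone (fun r => (r, c1 + (M : Int) + 1)) _ (r1 - 1) (N + 1) (by omega),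
    pyRange_map_negone (fun c => (r1, c)) _ c1 M (by omega)]
  simp only [List.append_assoc]
  rw [show (N + 2) = (N + 1) + 1 from rfl]
  rw [adjW_four read _ _ _ _ (N + 1) M N M _ (fun hM => by subst hM; norm_num)]
  rw [NF]
  rw [range_map_cons (M) (fun (k : Nat) =>
      (((r1 + (N : Int) + 1, c1 + (k : Int)), read (r1 + (N : Int) + 1, c1 + (k : Int) + 1)) : (Int × Int) × Int)),
    range_map_cons (N) (fun (k : Nat) =>
      (((r1 + (N : Int) + 1 - (k : Int), c1 + (M : Int) + 1), read (r1 + (N : Int) - (k : Int), c1 + (M : Int) + 1)) : (Int × Int) × Int)),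
    range_map_cons (M) (fun (k : Nat) =>
      (((r1, c1 + (M : Int) + 1 - (k : Int)), read (r1, c1 + (M : Int) - (k : Int))) : (Int × Int) × Int))]
  simp only [List.append_assoc, List.cons_append]
  refine congrArg₂ (· ++ ·) ?_ (congrArg₂ List.cons ?_ (congrArg₂ (· ++ ·) ?_ (congrArg₂ List.cons ?_ (congrArg₂ (· ++ ·) ?_ (congrArg₂ List.cons ?_ ?_)))))
  · exact List.map_congr_left (fun k _ => pairF_eq read (by omega) (by omega) (by omega) (by omega))
  · exact pairF_eq read (by omega) (by omega) (by omega) (by omega)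
  · exact List.map_congr_left (fun k _ => pairF_eq read (by omega) (by omega) (by omega) (by omega))
  · exact pairF_eq read (by omega) (by omega) (by omega) (by omega)
  · exact List.map_congr_left (fun k _ => pairF_eq read (by omega) (by omega) (by omega) (by omega))
  · exact pairF_eq read (by omega) (by omega) (by omega) (by omega)
  · -- remaining: adjW over the fourth segment vs the tail of NF's fourth segment
    cases M with
    | zero => rfl
    | succ M' =>
      rw [adjW_map_range read M' _ _]
      rw [show List.range (M' + 1) = List.range M' ++ [M'] from List.range_succ, List.map_append, List.map_singleton]
      refine congrArg₂ (· ++ ·) ?_ ?_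
      · exact List.map_congr_left (fun k _ => pairF_eq read (by omega) (by omega) (by omega) (by omega))
      · exact congrArg (fun p => [p]) (pairF_eq read (by omega) (by omega) (by omega) (by omega))

-- the values A's running min visits = the values B reads along the ring tail
theorem V_nf (read : Int × Int → Int) (r1 c1 : Int) (N M : Nat) :
    (PySem.List.pyRange r1 (r1 + (N : Int) + 1) 1).map (fun r => read (r + 1, c1))
    ++ (PySem.List.pyRange c1 (c1 + (M : Int) + 1) 1).map (fun c => read (r1 + (N : Int) + 1, c + 1))
    ++ (PySem.List.pyRange (r1 + (N : Int) + 1) r1 (-1)).map (fun r => read (r - 1, c1 + (M : Int) + 1))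
    ++ (PySem.List.pyRange (c1 + (M : Int) + 1) (c1 + 1) (-1)).map (fun c => read (r1, c - 1))
    = (ringT r1 c1 (r1 + (N : Int) + 1) (c1 + (M : Int) + 1)).map read := by
  rw [ringT]
  rw [List.map_append, List.map_append, List.map_append, List.map_map, List.map_map,
    List.map_map, List.map_map]
  rw [pyRange_map_one _ r1 _ (N + 1) (by omega),
    pyRange_map_one _ c1 _ (M + 1) (by omega),
    pyRange_map_negone _ _ r1 (N + 1) (by omega),
    pyRange_map_negone _ _ (c1 + 1) M (by omega),
    pyRange_map_one _ (r1 + 1) _ (N + 1) (by omega),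
    pyRange_map_one _ (c1 + 1) _ (M + 1) (by omega),
    pyRange_map_negone _ _ (r1 - 1) (N + 1) (by omega),
    pyRange_map_negone _ _ c1 M (by omega)]
  refine congrArg₂ (· ++ ·) (congrArg₂ (· ++ ·) (congrArg₂ (· ++ ·) ?_ ?_) ?_) ?_ <;>
    refine List.map_congr_left (fun k _ => ?_) <;>
    (simp only [Function.comp_apply]; congr 1; simp only [Prod.mk.injEq];
     refine ⟨?_, ?_⟩ <;> first | omega | trivial)

-- A's whole query step: all four loops and the corner write as one batch write over the
-- starting grid, the running min as a fold over the values they read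
theorem stepA_char (g : List (List Int)) (ans : List Int) (q : List Int) (r1 c1 r2 c2 : Int)
    (hq0 : PySem.List.pyGetD q 0 0 = r1 + 1) (hq1 : PySem.List.pyGetD q 1 0 = c1 + 1)
    (hq2 : PySem.List.pyGetD q 2 0 = r2 + 1) (hq3 : PySem.List.pyGetD q 3 0 = c2 + 1)
    (h0r : 0 ≤ r1) (hrr : r1 < r2) (hr2 : r2 < (g.length : Int))
    (h0c : 0 ≤ c1) (hcc : c1 < c2) (hc2len : c2 < ((PySem.List.pyGetD g r1 []).length : Int)) :
    solutionStep (g, ans) q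
    = (writeList ((PySem.List.pyRange r1 r2 1).map (fun r => ((r, c1), getCell g (r + 1) c1))
        ++ (PySem.List.pyRange c1 c2 1).map (fun c => ((r2, c), getCell g r2 (c + 1)))
        ++ (PySem.List.pyRange r2 r1 (-1)).map (fun r => ((r, c2), getCell g (r - 1) c2))
        ++ (PySem.List.pyRange c2 (c1 + 1) (-1)).map (fun c => ((r1, c), getCell g r1 (c - 1)))
        ++ [((r1, c1 + 1), getCell g r1 c1)]) g,
       ans ++ [((PySem.List.pyRange r1 r2 1).map (fun r => getCell g (r + 1) c1)
        ++ (PySem.List.pyRange c1 c2 1).map (fun c => getCell g r2 (c + 1))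
        ++ (PySem.List.pyRange r2 r1 (-1)).map (fun r => getCell g (r - 1) c2)
        ++ (PySem.List.pyRange c2 (c1 + 1) (-1)).map (fun c => getCell g r1 (c - 1))).foldl (fun acc v => min v acc) (getCell g r1 c1)]) := by
  simp only [solutionStep, hq0, hq1, hq2, hq3, add_sub_cancel_right]
  have hL1 : (PySem.List.pyRange r1 r2 1).foldl
      (fun (p : List (List Int) × Int) r =>
        (setCell p.1 r c1 (getCell p.1 (r + 1) c1), min (getCell p.1 (r + 1) c1) p.2))
      (g, getCell g r1 c1)
      = (writeList ((PySem.List.pyRange r1 r2 1).map (fun r => ((r, c1), getCell g (r + 1) c1))) g, ((PySem.List.pyRange r1 r2 1).map (fun r => getCell g (r + 1) c1)).foldl (fun acc v => min v acc) (getCell g r1 c1)) := by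
    refine loop_char (fun r => (r, c1)) (fun r => (r + 1, c1)) _ g _ ?_ ?_
    · intro x hx
      rw [PySem.List.mem_pyRange_one] at hx
      refine ⟨?_, ?_, ?_, ?_⟩ <;> (beta_reduce; try simp only []; omega)
    · refine (PySem.List.pairwise_lt_pyRange_one r1 r2).imp ?_
      intro a b hab hEq
      simp only [Prod.mk.injEq] at hEq
      omega
  rw [hL1]
  have hL2 : (PySem.List.pyRange c1 c2 1).foldl
      (fun (p : List (List Int) × Int) c =>
        (setCell p.1 r2 c (getCell p.1 r2 (c + 1)), min (getCell p.1 r2 (c + 1)) p.2))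
      (writeList ((PySem.List.pyRange r1 r2 1).map (fun r => ((r, c1), getCell g (r + 1) c1))) g, ((PySem.List.pyRange r1 r2 1).map (fun r => getCell g (r + 1) c1)).foldl (fun acc v => min v acc) (getCell g r1 c1))
      = (writeList ((PySem.List.pyRange c1 c2 1).map (fun c => ((r2, c), getCell (writeList ((PySem.List.pyRange r1 r2 1).map (fun r => ((r, c1), getCell g (r + 1) c1))) g) r2 (c + 1)))) (writeList ((PySem.List.pyRange r1 r2 1).map (fun r => ((r, c1), getCell g (r + 1) c1))) g),
         ((PySem.List.pyRange c1 c2 1).map (fun c => getCell (writeList ((PySem.List.pyRange r1 r2 1).map (fun r => ((r, c1), getCell g (r + 1) c1))) g) r2 (c + 1))).foldl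
           (fun acc v => min v acc) (((PySem.List.pyRange r1 r2 1).map (fun r => getCell g (r + 1) c1)).foldl (fun acc v => min v acc) (getCell g r1 c1))) := by
    refine loop_char (fun c => (r2, c)) (fun c => (r2, c + 1)) _ _ _ ?_ ?_
    · intro x hx
      rw [PySem.List.mem_pyRange_one] at hx
      refine ⟨?_, ?_, ?_, ?_⟩ <;> (beta_reduce; try simp only []; omega)
    · refine (PySem.List.pairwise_lt_pyRange_one c1 c2).imp ?_
      intro a b hab hEq
      simp only [Prod.mk.injEq] at hEq
      omega
  rw [hL2]
  have hC2 : ∀ x ∈ PySem.List.pyRange c1 c2 1,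
      getCell (writeList ((PySem.List.pyRange r1 r2 1).map (fun r => ((r, c1), getCell g (r + 1) c1))) g) r2 (x + 1) = getCell g r2 (x + 1) := by
    intro x hx
    rw [PySem.List.mem_pyRange_one] at hx
    refine getCell_writeList_ne _ (by omega) (by omega) _ ?_
    intro p hp
    rw [List.mem_map] at hp
    obtain ⟨r, hr, rfl⟩ := hp
    rw [PySem.List.mem_pyRange_one] at hr
    refine ⟨?_, ?_, ?_⟩
    · beta_reduce; try simp only []; omega
    · beta_reduce; try simp only []; omega
    · intro hEq
      simp only [Prod.mk.injEq] at hEq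
      omega
  rw [List.map_congr_left (fun x hx => by rw [hC2 x hx] :
      ∀ x ∈ PySem.List.pyRange c1 c2 1,
        ((r2, x), getCell (writeList ((PySem.List.pyRange r1 r2 1).map (fun r => ((r, c1), getCell g (r + 1) c1))) g) r2 (x + 1)) = ((r2, x), getCell g r2 (x + 1))),
    List.map_congr_left hC2, ← writeList_append, ← List.foldl_append]
  have hL3 : (PySem.List.pyRange r2 r1 (-1)).foldl
      (fun (p : List (List Int) × Int) r =>
        (setCell p.1 r c2 (getCell p.1 (r - 1) c2), min (getCell p.1 (r - 1) c2) p.2))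
      (writeList ((PySem.List.pyRange r1 r2 1).map (fun r => ((r, c1), getCell g (r + 1) c1)) ++ (PySem.List.pyRange c1 c2 1).map (fun c => ((r2, c), getCell g r2 (c + 1)))) g,
       ((PySem.List.pyRange r1 r2 1).map (fun r => getCell g (r + 1) c1) ++ (PySem.List.pyRange c1 c2 1).map (fun c => getCell g r2 (c + 1))).foldl (fun acc v => min v acc) (getCell g r1 c1))
      = (writeList ((PySem.List.pyRange r2 r1 (-1)).map (fun r => ((r, c2), getCell (writeList ((PySem.List.pyRange r1 r2 1).map (fun r => ((r, c1), getCell g (r + 1) c1)) ++ (PySem.List.pyRange c1 c2 1).map (fun c => ((r2, c), getCell g r2 (c + 1)))) g) (r - 1) c2))) (writeList ((PySem.List.pyRange r1 r2 1).map (fun r => ((r, c1), getCell g (r + 1) c1)) ++ (PySem.List.pyRange c1 c2 1).map (fun c => ((r2, c), getCell g r2 (c + 1)))) g),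
         ((PySem.List.pyRange r2 r1 (-1)).map (fun r => getCell (writeList ((PySem.List.pyRange r1 r2 1).map (fun r => ((r, c1), getCell g (r + 1) c1)) ++ (PySem.List.pyRange c1 c2 1).map (fun c => ((r2, c), getCell g r2 (c + 1)))) g) (r - 1) c2)).foldl
           (fun acc v => min v acc) (((PySem.List.pyRange r1 r2 1).map (fun r => getCell g (r + 1) c1) ++ (PySem.List.pyRange c1 c2 1).map (fun c => getCell g r2 (c + 1))).foldl (fun acc v => min v acc) (getCell g r1 c1))) := by
    refine loop_char (fun r => (r, c2)) (fun r => (r - 1, c2)) _ _ _ ?_ ?_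
    · intro x hx
      rw [PySem.List.mem_pyRange_neg_one] at hx
      refine ⟨?_, ?_, ?_, ?_⟩ <;> (beta_reduce; try simp only []; omega)
    · rw [PySem.List.pyRange_neg_one_eq_reverse, List.pairwise_reverse]
      refine (PySem.List.pairwise_lt_pyRange_one (r1 + 1) (r2 + 1)).imp ?_
      intro a b hab hEq
      simp only [Prod.mk.injEq] at hEq
      omega
  rw [hL3]
  have hC3 : ∀ x ∈ PySem.List.pyRange r2 r1 (-1),
      getCell (writeList ((PySem.List.pyRange r1 r2 1).map (fun r => ((r, c1), getCell g (r + 1) c1)) ++ (PySem.List.pyRange c1 c2 1).map (fun c => ((r2, c), getCell g r2 (c + 1)))) g) (x - 1) c2 = getCell g (x - 1) c2 := by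
    intro x hx
    rw [PySem.List.mem_pyRange_neg_one] at hx
    refine getCell_writeList_ne _ (by omega) (by omega) _ ?_
    intro p hp
    rw [List.mem_append] at hp
    rcases hp with hp | hp <;>
    · rw [List.mem_map] at hp
      obtain ⟨r, hr, rfl⟩ := hp
      rw [PySem.List.mem_pyRange_one] at hr
      refine ⟨?_, ?_, ?_⟩
      · beta_reduce; try simp only []; omega
      · beta_reduce; try simp only []; omega
      · intro hEq
        simp only [Prod.mk.injEq] at hEq
        omega
  rw [List.map_congr_left (fun x hx => by rw [hC3 x hx] :
      ∀ x ∈ PySem.List.pyRange r2 r1 (-1),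
        ((x, c2), getCell (writeList ((PySem.List.pyRange r1 r2 1).map (fun r => ((r, c1), getCell g (r + 1) c1)) ++ (PySem.List.pyRange c1 c2 1).map (fun c => ((r2, c), getCell g r2 (c + 1)))) g) (x - 1) c2) = ((x, c2), getCell g (x - 1) c2)),
    List.map_congr_left hC3, ← writeList_append, ← List.foldl_append]
  have hL4 : (PySem.List.pyRange c2 (c1 + 1) (-1)).foldl
      (fun (p : List (List Int) × Int) c =>
        (setCell p.1 r1 c (getCell p.1 r1 (c - 1)),
         min (getCell (setCell p.1 r1 c (getCell p.1 r1 (c - 1))) r1 c) p.2))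
      (writeList ((PySem.List.pyRange r1 r2 1).map (fun r => ((r, c1), getCell g (r + 1) c1)) ++ (PySem.List.pyRange c1 c2 1).map (fun c => ((r2, c), getCell g r2 (c + 1))) ++ (PySem.List.pyRange r2 r1 (-1)).map (fun r => ((r, c2), getCell g (r - 1) c2))) g,
       ((PySem.List.pyRange r1 r2 1).map (fun r => getCell g (r + 1) c1) ++ (PySem.List.pyRange c1 c2 1).map (fun c => getCell g r2 (c + 1)) ++ (PySem.List.pyRange r2 r1 (-1)).map (fun r => getCell g (r - 1) c2)).foldl (fun acc v => min v acc) (getCell g r1 c1))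
      = (writeList ((PySem.List.pyRange c2 (c1 + 1) (-1)).map (fun c => ((r1, c), getCell (writeList ((PySem.List.pyRange r1 r2 1).map (fun r => ((r, c1), getCell g (r + 1) c1)) ++ (PySem.List.pyRange c1 c2 1).map (fun c => ((r2, c), getCell g r2 (c + 1))) ++ (PySem.List.pyRange r2 r1 (-1)).map (fun r => ((r, c2), getCell g (r - 1) c2))) g) r1 (c - 1)))) (writeList ((PySem.List.pyRange r1 r2 1).map (fun r => ((r, c1), getCell g (r + 1) c1)) ++ (PySem.List.pyRange c1 c2 1).map (fun c => ((r2, c), getCell g r2 (c + 1))) ++ (PySem.List.pyRange r2 r1 (-1)).map (fun r => ((r, c2), getCell g (r - 1) c2))) g),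
         ((PySem.List.pyRange c2 (c1 + 1) (-1)).map (fun c => getCell (writeList ((PySem.List.pyRange r1 r2 1).map (fun r => ((r, c1), getCell g (r + 1) c1)) ++ (PySem.List.pyRange c1 c2 1).map (fun c => ((r2, c), getCell g r2 (c + 1))) ++ (PySem.List.pyRange r2 r1 (-1)).map (fun r => ((r, c2), getCell g (r - 1) c2))) g) r1 (c - 1))).foldl
           (fun acc v => min v acc) (((PySem.List.pyRange r1 r2 1).map (fun r => getCell g (r + 1) c1) ++ (PySem.List.pyRange c1 c2 1).map (fun c => getCell g r2 (c + 1)) ++ (PySem.List.pyRange r2 r1 (-1)).map (fun r => getCell g (r - 1) c2)).foldl (fun acc v => min v acc) (getCell g r1 c1))) := by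
    have hnnW : ∀ p ∈ ((PySem.List.pyRange r1 r2 1).map (fun r => ((r, c1), getCell g (r + 1) c1)) ++ (PySem.List.pyRange c1 c2 1).map (fun c => ((r2, c), getCell g r2 (c + 1))) ++ (PySem.List.pyRange r2 r1 (-1)).map (fun r => ((r, c2), getCell g (r - 1) c2))), (0:Int) ≤ p.1.1 ∧ (0:Int) ≤ p.1.2 := by
      intro p hp
      rw [List.mem_append] at hp
      rcases hp with hp | hp
      · rw [List.mem_append] at hp
        rcases hp with hp | hp <;>
        · rw [List.mem_map] at hp
          obtain ⟨r, hr, rfl⟩ := hp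
          rw [PySem.List.mem_pyRange_one] at hr
          refine ⟨?_, ?_⟩ <;> (beta_reduce; try simp only []; omega)
      · rw [List.mem_map] at hp
        obtain ⟨r, hr, rfl⟩ := hp
        rw [PySem.List.mem_pyRange_neg_one] at hr
        refine ⟨?_, ?_⟩ <;> (beta_reduce; try simp only []; omega)
    refine loop4_char (fun c => (r1, c)) (fun c => (r1, c - 1)) _ _ _ ?_ ?_ ?_
    · intro x hx
      rw [PySem.List.mem_pyRange_neg_one] at hx
      refine ⟨?_, ?_, ?_, ?_⟩ <;> (beta_reduce; try simp only []; omega)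
    · rw [PySem.List.pyRange_neg_one_eq_reverse, List.pairwise_reverse]
      refine (PySem.List.pairwise_lt_pyRange_one (c1 + 1 + 1) (c2 + 1)).imp ?_
      intro a b hab hEq
      simp only [Prod.mk.injEq] at hEq
      omega
    · intro x hx
      rw [PySem.List.mem_pyRange_neg_one] at hx
      constructor
      · rw [length_writeList]
        beta_reduce
        try simp only []
        omega
      · rw [rowLen_writeList _ (by beta_reduce; try simp only []; omega) _ hnnW]
        beta_reduce
        try simp only []
        omega
  rw [hL4]
  have hC4 : ∀ x ∈ PySem.List.pyRange c2 (c1 + 1) (-1),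
      getCell (writeList ((PySem.List.pyRange r1 r2 1).map (fun r => ((r, c1), getCell g (r + 1) c1)) ++ (PySem.List.pyRange c1 c2 1).map (fun c => ((r2, c), getCell g r2 (c + 1))) ++ (PySem.List.pyRange r2 r1 (-1)).map (fun r => ((r, c2), getCell g (r - 1) c2))) g) r1 (x - 1) = getCell g r1 (x - 1) := by
    intro x hx
    rw [PySem.List.mem_pyRange_neg_one] at hx
    refine getCell_writeList_ne _ (by omega) (by omega) _ ?_
    intro p hp
    rw [List.mem_append] at hp
    rcases hp with hp | hp
    · rw [List.mem_append] at hp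
      rcases hp with hp | hp <;>
      · rw [List.mem_map] at hp
        obtain ⟨r, hr, rfl⟩ := hp
        rw [PySem.List.mem_pyRange_one] at hr
        refine ⟨?_, ?_, ?_⟩
        · beta_reduce; try simp only []; omega
        · beta_reduce; try simp only []; omega
        · intro hEq
          simp only [Prod.mk.injEq] at hEq
          omega
    · rw [List.mem_map] at hp
      obtain ⟨r, hr, rfl⟩ := hp
      rw [PySem.List.mem_pyRange_neg_one] at hr
      refine ⟨?_, ?_, ?_⟩
      · beta_reduce; try simp only []; omega
      · beta_reduce; try simp only []; omega
      · intro hEq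
        simp only [Prod.mk.injEq] at hEq
        omega
  rw [List.map_congr_left (fun x hx => by rw [hC4 x hx] :
      ∀ x ∈ PySem.List.pyRange c2 (c1 + 1) (-1),
        ((r1, x), getCell (writeList ((PySem.List.pyRange r1 r2 1).map (fun r => ((r, c1), getCell g (r + 1) c1)) ++ (PySem.List.pyRange c1 c2 1).map (fun c => ((r2, c), getCell g r2 (c + 1))) ++ (PySem.List.pyRange r2 r1 (-1)).map (fun r => ((r, c2), getCell g (r - 1) c2))) g) r1 (x - 1)) = ((r1, x), getCell g r1 (x - 1))),
    List.map_congr_left hC4, ← writeList_append, ← List.foldl_append]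
  rw [show setCell (writeList ((PySem.List.pyRange r1 r2 1).map (fun r => ((r, c1), getCell g (r + 1) c1)) ++ (PySem.List.pyRange c1 c2 1).map (fun c => ((r2, c), getCell g r2 (c + 1))) ++ (PySem.List.pyRange r2 r1 (-1)).map (fun r => ((r, c2), getCell g (r - 1) c2)) ++ (PySem.List.pyRange c2 (c1 + 1) (-1)).map (fun c => ((r1, c), getCell g r1 (c - 1)))) g) r1 (c1 + 1) (getCell g r1 c1)
      = writeList [((r1, c1 + 1), getCell g r1 c1)] (writeList ((PySem.List.pyRange r1 r2 1).map (fun r => ((r, c1), getCell g (r + 1) c1)) ++ (PySem.List.pyRange c1 c2 1).map (fun c => ((r2, c), getCell g r2 (c + 1))) ++ (PySem.List.pyRange r2 r1 (-1)).map (fun r => ((r, c2), getCell g (r - 1) c2)) ++ (PySem.List.pyRange c2 (c1 + 1) (-1)).map (fun c => ((r1, c), getCell g r1 (c - 1)))) g) from rfl,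
    ← writeList_append]

-- B's whole query step: min of the ring values, then one batch write of the shifted values
theorem stepB_char (g : List (List Int)) (ans : List Int) (q : List Int) (r1 c1 r2 c2 : Int)
    (hq0 : PySem.List.pyGetD q 0 0 = r1 + 1) (hq1 : PySem.List.pyGetD q 1 0 = c1 + 1)
    (hq2 : PySem.List.pyGetD q 2 0 = r2 + 1) (hq3 : PySem.List.pyGetD q 3 0 = c2 + 1)
    (hrr : r1 < r2) :
    solutionAltStep (g, ans) q
    = (writeList (adjW (fun rc => getCell g rc.1 rc.2) (ringL r1 c1 r2 c2) (getCell g r1 c1)) g,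
       ans ++ [((ringT r1 c1 r2 c2).map (fun rc => getCell g rc.1 rc.2)).foldl min (getCell g r1 c1)]) := by
  simp only [solutionAltStep, hq0, hq1, hq2, hq3, add_sub_cancel_right]
  rw [show ((PySem.List.pyRange r1 (r2 + 1) 1).map (fun r => (r, c1))
      ++ (PySem.List.pyRange (c1 + 1) (c2 + 1) 1).map (fun c => (r2, c))
      ++ (PySem.List.pyRange (r2 - 1) (r1 - 1) (-1)).map (fun r => (r, c2))
      ++ (PySem.List.pyRange (c2 - 1) c1 (-1)).map (fun c => (r1, c)))
      = ringL r1 c1 r2 c2 from rfl]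
  rw [ring_cons r1 c1 r2 c2 (by omega)]
  simp only [List.map_cons]
  rw [PySem.List.min?_id_cons, Option.getD_some]
  rw [PySem.List.slice_from _ (by norm_num), PySem.List.slice_to _ (by norm_num)]
  simp only [Int.toNat_one, List.drop_succ_cons, List.drop_zero, List.take_succ_cons,
    List.take_zero]
  rw [zip_tail_adjW]
  rfl

-- grids stay rectangular
theorem shape_mkGrid {rows columns : Int} (hr : 0 ≤ rows) (hc : 0 ≤ columns) :
    ShapeG (mkGrid rows columns) rows columns := by
  constructor
  · rw [mkGrid, List.length_map, PySem.List.length_pyRange_one]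
    omega
  · intro row hrow
    rw [mkGrid, List.mem_map] at hrow
    obtain ⟨i, _, rfl⟩ := hrow
    rw [List.length_map, PySem.List.length_pyRange_one]
    omega

-- the two query steps agree on any rectangular grid, for an admissible query
theorem step_eq (rows columns : Int) (g : List (List Int)) (ans : List Int) (q : List Int)
    (hs : ShapeG g rows columns)
    (hq : 4 ≤ q.length ∧ 1 ≤ q.getD 0 0 ∧ q.getD 0 0 < q.getD 2 0 ∧ q.getD 2 0 ≤ rows ∧
          1 ≤ q.getD 1 0 ∧ q.getD 1 0 < q.getD 3 0 ∧ q.getD 3 0 ≤ columns) :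
    solutionStep (g, ans) q = solutionAltStep (g, ans) q := by
  obtain ⟨hl, ha1, ha2, ha3, hb1, hb2, hb3⟩ := hq
  have b0 : PySem.List.pyGetD q 0 0 = q.getD 0 0 := by
    simp [PySem.List.pyGetD_zero]
  have b1 : PySem.List.pyGetD q 1 0 = q.getD 1 0 := by
    simp [PySem.List.pyGetD_ofNat']
  have b2 : PySem.List.pyGetD q 2 0 = q.getD 2 0 := by
    simp [PySem.List.pyGetD_ofNat']
  have b3 : PySem.List.pyGetD q 3 0 = q.getD 3 0 := by
    simp [PySem.List.pyGetD_ofNat']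
  set r1 : Int := q.getD 0 0 - 1 with hr1
  set c1 : Int := q.getD 1 0 - 1 with hc1
  set r2 : Int := q.getD 2 0 - 1 with hr2
  set c2 : Int := q.getD 3 0 - 1 with hc2
  have hq0 : PySem.List.pyGetD q 0 0 = r1 + 1 := by rw [b0, hr1]; ring
  have hq1 : PySem.List.pyGetD q 1 0 = c1 + 1 := by rw [b1, hc1]; ring
  have hq2 : PySem.List.pyGetD q 2 0 = r2 + 1 := by rw [b2, hr2]; ring
  have hq3 : PySem.List.pyGetD q 3 0 = c2 + 1 := by rw [b3, hc2]; ring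
  have hglen : (g.length : Int) = rows := hs.1
  have hr2lt : r2 < (g.length : Int) := by omega
  have hrowlen : ((PySem.List.pyGetD g r1 []).length : Int) = columns := by
    refine hs.2 _ (PySem.List.pyGetD_mem g [] ?_)
    unfold PySem.Raise.InRange
    constructor <;> omega
  have hc2len : c2 < ((PySem.List.pyGetD g r1 []).length : Int) := by omega
  obtain ⟨N, hN⟩ : ∃ N : Nat, r2 = r1 + (N : Int) + 1 := ⟨(r2 - r1 - 1).toNat, by omega⟩
  obtain ⟨M, hM⟩ : ∃ M : Nat, c2 = c1 + (M : Int) + 1 := ⟨(c2 - c1 - 1).toNat, by omega⟩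
  rw [stepA_char g ans q r1 c1 r2 c2 hq0 hq1 hq2 hq3 (by omega) (by omega) hr2lt (by omega)
      (by omega) hc2len,
    stepB_char g ans q r1 c1 r2 c2 hq0 hq1 hq2 hq3 (by omega)]
  rw [Prod.mk.injEq]
  constructor
  · rw [hN, hM]
    refine congrArg (fun L => writeList L g) ?_
    exact (A_nf (fun rc => getCell g rc.1 rc.2) r1 c1 N M).trans
      (B_nf (fun rc => getCell g rc.1 rc.2) r1 c1 N M).symm
  · refine congrArg (fun v => ans ++ [v]) ?_
    rw [hN, hM]
    have hv : ((PySem.List.pyRange r1 (r1 + (N : Int) + 1) 1).map (fun r => getCell g (r + 1) c1)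
        ++ (PySem.List.pyRange c1 (c1 + (M : Int) + 1) 1).map (fun c => getCell g (r1 + (N : Int) + 1) (c + 1))
        ++ (PySem.List.pyRange (r1 + (N : Int) + 1) r1 (-1)).map (fun r => getCell g (r - 1) (c1 + (M : Int) + 1))
        ++ (PySem.List.pyRange (c1 + (M : Int) + 1) (c1 + 1) (-1)).map (fun c => getCell g r1 (c - 1)))
        = (ringT r1 c1 (r1 + (N : Int) + 1) (c1 + (M : Int) + 1)).map (fun rc => getCell g rc.1 rc.2) :=
      V_nf (fun rc => getCell g rc.1 rc.2) r1 c1 N M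
    rw [hv]
    exact PySem.List.foldl_congr_mem _ _ _ _ (fun acc x _ => min_comm x acc)

-- B's step keeps the grid rectangular
theorem shape_stepB (rows columns : Int) (g : List (List Int)) (ans : List Int) (q : List Int)
    (hs : ShapeG g rows columns)
    (hq : 4 ≤ q.length ∧ 1 ≤ q.getD 0 0 ∧ q.getD 0 0 < q.getD 2 0 ∧ q.getD 2 0 ≤ rows ∧
          1 ≤ q.getD 1 0 ∧ q.getD 1 0 < q.getD 3 0 ∧ q.getD 3 0 ≤ columns) :
    ShapeG (solutionAltStep (g, ans) q).1 rows columns := by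
  obtain ⟨hl, ha1, ha2, ha3, hb1, hb2, hb3⟩ := hq
  have b0 : PySem.List.pyGetD q 0 0 = q.getD 0 0 := by simp [PySem.List.pyGetD_zero]
  have b1 : PySem.List.pyGetD q 1 0 = q.getD 1 0 := by simp [PySem.List.pyGetD_ofNat']
  have b2 : PySem.List.pyGetD q 2 0 = q.getD 2 0 := by simp [PySem.List.pyGetD_ofNat']
  have b3 : PySem.List.pyGetD q 3 0 = q.getD 3 0 := by simp [PySem.List.pyGetD_ofNat']
  simp only [solutionAltStep]
  refine shape_writeList _ _ ?_ hs
  intro p hp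
  have hpring := (List.of_mem_zip (a := p.1) (b := p.2) (by rw [Prod.mk.eta]; exact hp)).1
  rw [b0, b1, b2, b3] at hpring
  simp only [List.mem_append, List.mem_map, PySem.List.mem_pyRange_one,
    PySem.List.mem_pyRange_neg_one] at hpring
  rcases hpring with ((⟨r, hr, hrp⟩ | ⟨c, hcc, hcp⟩) | ⟨r, hr, hrp⟩) | ⟨c, hcc, hcp⟩
  · rw [← hrp]
    refine ⟨?_, ?_⟩ <;> (try simp only []; omega)
  · rw [← hcp]
    refine ⟨?_, ?_⟩ <;> (try simp only []; omega)
  · rw [← hrp]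
    refine ⟨?_, ?_⟩ <;> (try simp only []; omega)
  · rw [← hcp]
    refine ⟨?_, ?_⟩ <;> (try simp only []; omega)

-- the whole fold over the queries
theorem fold_eq (rows columns : Int) (qs : List (List Int)) :
    ∀ (g : List (List Int)) (ans : List Int), ShapeG g rows columns →
    (∀ q ∈ qs, 4 ≤ q.length ∧ 1 ≤ q.getD 0 0 ∧ q.getD 0 0 < q.getD 2 0 ∧ q.getD 2 0 ≤ rows ∧
          1 ≤ q.getD 1 0 ∧ q.getD 1 0 < q.getD 3 0 ∧ q.getD 3 0 ≤ columns) →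
    qs.foldl solutionStep (g, ans) = qs.foldl solutionAltStep (g, ans) := by
  induction qs with
  | nil => intro g ans _ _; rfl
  | cons qh qt ih =>
    intro g ans hs hq
    rw [List.foldl_cons, List.foldl_cons, step_eq rows columns g ans qh hs (hq qh (by simp))]
    rw [show solutionAltStep (g, ans) qh
        = ((solutionAltStep (g, ans) qh).1, (solutionAltStep (g, ans) qh).2) from rfl]
    exact ih _ _ (shape_stepB rows columns g ans qh hs (hq qh (by simp)))
      (fun q hq' => hq q (by simp [hq']))

-- ===== VERDICT (by name: the statement is the Claim_ definition above) =====
theorem solution_spec : Claim_equal_solution := by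
  unfold Claim_equal_solution
  intro rows columns queries _ hpre
  unfold Spec_solution solution solution_alt
  cases queries with
  | nil => rfl
  | cons qh qt =>
    obtain ⟨hl, ha1, ha2, ha3, hb1, hb2, hb3⟩ := hpre qh (by simp)
    exact congrArg Prod.snd (fold_eq rows columns (qh :: qt) (mkGrid rows columns) []
      (shape_mkGrid (by omega) (by omega)) hpre)
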